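-- pv_equiv track=rewrite | github.com/aconsilvio/SoftDesSp15 | gene_finder/gene_finder.py | rest_of_ORF
-- ===== SOURCE A (Python) =====
-- def rest_of_ORF(dna):
--     """ Takes a DNA sequence that is assumed to begin with a start codon and returns
--         the sequence up to but not including the first in frame stop codon.  If there
--         is no in frame stop codon, returns the whole string.
--
--         dna: a DNA sequence
--         returns: the open reading frame represented as a string
--     >>> rest_of_ORF("ATGTGAA")
--     'ATG'
--     >>> rest_of_ORF("ATGAGATAGG")
--     'ATGAGA'
--     >>> rest_of_ORF("ATGGGGGGCCCCTAG")
--     'ATGGGGGGCCCC'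
--     """
--
--     #inital conditions
--     i = 3
--     end_index = len(dna)
--     stop_codon = ('TAG','TAA','TGA')
--
--     #for the length of the string of DNA, run through each codon and break and return the indec of the string if the codon is a stop codon
--     while i < len(dna)-2:
--         codon = dna[i:i+3] #takes only every third index which is the length of a codon
--         if codon in stop_codon:
--             end_index = i
--             break
--         i += 3
--     #returns a list from the start codon to the index where the stop codon begins
--     return dna[0:end_index]
-- ===== SOURCE B (Python) =====
-- def rest_of_ORF(dna):
--     # Chunk the string into a list of codons once, keep the start codon unconditionally,
--     # then accumulate tail codons until the first stop codon.
--     codons = [dna[i:i+3] for i in range(0, len(dna), 3)]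
--     if not codons:
--         return ''
--     kept = [codons[0]]
--     for c in codons[1:]:
--         if c in ('TAG', 'TAA', 'TGA'):
--             break
--         kept.append(c)
--     return ''.join(kept)
-- ===== Notes on version B (the rewrite author's own statement) =====
-- stated objective: alternative
-- what changed: Replaced A's index-stepping while loop with slicing and an end_index with a one-shot chunking of the string into a codon list followed by an accumulate-until-stop scan over the tail codons.
import Mathlib
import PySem

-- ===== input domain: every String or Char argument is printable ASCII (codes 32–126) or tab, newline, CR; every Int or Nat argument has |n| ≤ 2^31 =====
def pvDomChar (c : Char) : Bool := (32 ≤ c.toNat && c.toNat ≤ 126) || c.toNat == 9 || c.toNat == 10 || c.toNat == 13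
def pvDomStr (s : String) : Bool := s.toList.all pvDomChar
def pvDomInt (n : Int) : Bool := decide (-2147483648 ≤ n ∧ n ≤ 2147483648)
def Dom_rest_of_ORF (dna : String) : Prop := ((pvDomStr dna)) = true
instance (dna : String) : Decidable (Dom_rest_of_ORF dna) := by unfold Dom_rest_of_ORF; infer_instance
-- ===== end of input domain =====

-- B re-decomposes A's index-stepping while loop as: chunk the string into the codon list once,
-- keep the start codon, accumulate tail codons until the first stop codon (objective: alternative).

-- ===== PORT A =====
-- A's while loop: i starts at 3, steps by 3 while i < len(dna) - 2; returns end_index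
-- (i where the stop codon was found, else len(dna)).  i is always ≥ 0, and Python's Int
-- condition 'i < len - 2' coincides with the Nat condition 'i < len - 2' here.
-- dna[i:i+3] is (drop i).take 3 (exact: PySem.List.slice_natCast_add);
-- dna[0:end_index] is take end_index (exact: PySem.List.slice_to_natCast).
def rest_of_ORF_loop (cs : List Char) (i : Nat) : Nat :=
  if _h : i < cs.length - 2 then
    let codon := (cs.drop i).take 3
    if codon ∈ [['T','A','G'], ['T','A','A'], ['T','G','A']] then i
    else rest_of_ORF_loop cs (i + 3)
  else cs.length
termination_by cs.length - i
decreasing_by omega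

def rest_of_ORF (dna : String) : String :=
  String.ofList (dna.toList.take (rest_of_ORF_loop dna.toList 3))

-- ===== PORT B =====
-- chunk3 cs = [dna[i:i+3] for i in range(0, len(dna), 3)]
def chunk3 (cs : List Char) : List (List Char) :=
  if cs = [] then []
  else cs.take 3 :: chunk3 (cs.drop 3)
termination_by cs.length
decreasing_by
  simp only [List.length_drop]
  have : cs ≠ [] := by assumption
  have := List.length_pos_of_ne_nil this
  omega

-- the 'for c in codons[1:]: break on stop else append' loop, with ''.join fused over the kept list
def keepUntilStop (codons : List (List Char)) : List (List Char) :=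
  match codons with
  | [] => []
  | c :: rest =>
    if c ∈ [['T','A','G'], ['T','A','A'], ['T','G','A']] then []
    else c :: keepUntilStop rest

def rest_of_ORF_alt (dna : String) : String :=
  match chunk3 dna.toList with
  | [] => ""
  | c0 :: rest => String.ofList (c0 ++ (keepUntilStop rest).flatten)

-- ===== PRECONDITION & SPEC =====
def Spec_rest_of_ORF (dna : String) (out : String) : Prop := out = rest_of_ORF_alt dna
instance (dna : String) (out : String) : Decidable (Spec_rest_of_ORF dna out) := by unfold Spec_rest_of_ORF; infer_instance

-- ===== CLAIM (what is proved, stated in full; the proofs are below) =====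
def Claim_equal_rest_of_ORF : Prop := ∀ (dna : String), Dom_rest_of_ORF dna → Spec_rest_of_ORF dna (rest_of_ORF dna)

-- ===== LEMMAS AND PROOFS =====

-- a chunk of length ≤ 2 is never a stop codon
theorem short_not_stop (t : List Char) (h : t.length ≤ 2) :
    t ∉ [['T','A','G'], ['T','A','A'], ['T','G','A']] := by
  intro hmem
  simp only [List.mem_cons, List.not_mem_nil, or_false] at hmem
  rcases hmem with h3 | h3 | h3 <;> subst h3 <;> simp at h

-- main loop invariant: A's take-end_index equals the kept codons of the remaining chunks
theorem loop_eq (cs : List Char) (i : Nat) :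
    cs.take (rest_of_ORF_loop cs i)
      = cs.take i ++ (keepUntilStop (chunk3 (cs.drop i))).flatten := by
  unfold rest_of_ORF_loop
  split
  · rename_i hlt
    have hne : cs.drop i ≠ [] := by
      intro h0
      have := congrArg List.length h0
      simp at this; omega
    rw [chunk3.eq_def, if_neg hne]
    by_cases hstop : (cs.drop i).take 3 ∈ [['T','A','G'], ['T','A','A'], ['T','G','A']]
    · simp only [keepUntilStop, if_true, List.flatten_nil, List.append_nil, hstop]
    · rw [if_neg hstop]
      rw [keepUntilStop, if_neg hstop]
      rw [List.drop_drop]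
      have IH := loop_eq cs (i + 3)
      rw [IH]
      rw [List.flatten_cons, List.take_add]
      simp [List.append_assoc]
  · rename_i hge
    have hlen : (cs.drop i).length ≤ 2 := by simp; omega
    rw [List.take_of_length_le (le_refl cs.length)]
    by_cases h0 : cs.drop i = []
    · rw [chunk3.eq_def, if_pos h0]
      have : cs.length ≤ i := by
        have := congrArg List.length h0; simp at this; omega
      simp [keepUntilStop, List.take_of_length_le this]
    · rw [chunk3.eq_def, if_neg h0]
      have htake : (cs.drop i).take 3 = cs.drop i :=
        List.take_of_length_le (by omega)
      have hdrop : (cs.drop i).drop 3 = [] := by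
        apply List.eq_nil_of_length_eq_zero; simp; omega
      rw [htake, hdrop, chunk3]
      rw [keepUntilStop, if_neg (short_not_stop _ hlen)]
      simp [keepUntilStop, List.take_append_drop]
termination_by cs.length - i
decreasing_by omega

theorem ports_agree (cs : List Char) :
    cs.take (rest_of_ORF_loop cs 3)
      = match chunk3 cs with
        | [] => []
        | c0 :: rest => c0 ++ (keepUntilStop rest).flatten := by
  by_cases h0 : cs = []
  · subst h0
    rw [chunk3]; simp [rest_of_ORF_loop]
  · rw [chunk3.eq_def, if_neg h0]
    simpa [List.drop_drop] using loop_eq cs 3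

-- ===== VERDICT (by name: the statement is the Claim_ definition above) =====
theorem rest_of_ORF_spec : Claim_equal_rest_of_ORF := by
  intro dna _
  unfold Spec_rest_of_ORF rest_of_ORF rest_of_ORF_alt
  have h := ports_agree dna.toList
  cases hc : chunk3 dna.toList with
  | nil => rw [hc] at h; rw [h]
  | cons c0 rest => rw [hc] at h; rw [h]
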